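-- pv_equiv track=rewrite | github.com/spk364/sport-superapp | apps/virtual-trainer-app/backend/services/questionnaire_service.py | _find_best_option_match
-- ===== SOURCE A (Python) =====
-- from typing import Dict, Any, List, Optional, Tuple
--
-- def _find_best_option_match(user_text: str, options: List[str]) -> Optional[str]:
--     """Find the best matching option from the list"""
--     user_lower = user_text.lower()
--
--     # Exact match first
--     for option in options:
--         if user_lower == option.lower():
--             return option
--
--     # Partial match
--     for option in options:
--         if user_lower in option.lower() or option.lower() in user_lower:
--             return option
--
--     # Word matching
--     user_words = user_lower.split()
--     best_match = None
--     max_matches = 0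
--
--     for option in options:
--         option_words = option.lower().split()
--         matches = sum(1 for word in user_words if any(word in opt_word or opt_word in word for opt_word in option_words))
--         if matches > max_matches:
--             max_matches = matches
--             best_match = option
--
--     return best_match if max_matches > 0 else None
-- ===== SOURCE B (Python) =====
-- from typing import List, Optional
--
-- def _find_best_option_match(user_text: str, options: List[str]) -> Optional[str]:
--     """Single scored pass: each option gets a lexicographic priority key
--     (3,0) exact, (2,0) substring either way, (1, word-match count);
--     the first option with the strictly greatest qualifying key wins."""
--     user_lower = user_text.lower()
--     user_words = user_lower.split()
--     best = None  # (key, option)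
--     for option in options:
--         option_lower = option.lower()
--         if user_lower == option_lower:
--             key = (3, 0)
--         elif user_lower in option_lower or option_lower in user_lower:
--             key = (2, 0)
--         else:
--             matches = sum(
--                 1 for word in user_words
--                 if any(word in ow or ow in word for ow in option_lower.split())
--             )
--             key = (1, matches)
--         qualifies = key[0] >= 2 or key[1] > 0
--         if qualifies and (best is None or best[0] < key):
--             best = (key, option)
--     return best[1] if best is not None else None
-- ===== Notes on version B (the rewrite author's own statement) =====
-- stated objective: alternative
-- what changed: Replaces A's three separate early-returning scans over the options (exact, then substring, then word-overlap argmax) with a single pass that scores every option with a lexicographic priority key (3,0)/(2,0)/(1,word-matches) and keeps the first option attaining the strictly greatest qualifying key.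
import Mathlib
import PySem

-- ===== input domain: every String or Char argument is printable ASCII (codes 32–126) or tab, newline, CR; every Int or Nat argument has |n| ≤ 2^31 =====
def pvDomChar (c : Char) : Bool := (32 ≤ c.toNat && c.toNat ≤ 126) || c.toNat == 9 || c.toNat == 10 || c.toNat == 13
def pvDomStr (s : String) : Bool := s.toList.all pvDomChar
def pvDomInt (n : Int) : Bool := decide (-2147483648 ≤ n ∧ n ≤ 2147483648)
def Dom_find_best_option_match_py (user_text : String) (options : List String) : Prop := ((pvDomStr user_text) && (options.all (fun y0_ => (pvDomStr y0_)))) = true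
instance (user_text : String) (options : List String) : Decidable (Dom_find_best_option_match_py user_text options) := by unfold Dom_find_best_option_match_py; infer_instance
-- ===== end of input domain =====

-- B replaces A's three early-returning scans by one scored pass with a lexicographic
-- priority key; same result, same cost class (objective: alternative).

-- ===== PORT A =====
-- shared helper: 1-count of user words hitting some option word (A's `sum(1 for … if any(…))`)
def pvMatches (userWords optWords : List String) : Nat :=
  userWords.countP (fun w => optWords.any (fun ow => PySem.Str.isIn w ow || PySem.Str.isIn ow w))

def find_best_option_match_py (user_text : String) (options : List String) : Option String :=
  let ul := PySem.Str.lower user_text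
  match options.find? (fun o => ul == PySem.Str.lower o) with
  | some o => some o
  | none =>
    match options.find? (fun o =>
        PySem.Str.isIn ul (PySem.Str.lower o) || PySem.Str.isIn (PySem.Str.lower o) ul) with
    | some o => some o
    | none =>
      let uw := PySem.Str.split₀ ul
      let r := options.foldl (fun (st : Option String × Nat) o =>
        let m := pvMatches uw (PySem.Str.split₀ (PySem.Str.lower o))
        if st.2 < m then (some o, m) else st) (none, 0)
      if 0 < r.2 then r.1 else none

-- ===== PORT B =====
def pvKey (ul : String) (uw : List String) (o : String) : Nat × Nat :=
  let ol := PySem.Str.lower o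
  if ul == ol then (3, 0)
  else if PySem.Str.isIn ul ol || PySem.Str.isIn ol ul then (2, 0)
  else (1, pvMatches uw (PySem.Str.split₀ ol))

def pvKeyLt (a b : Nat × Nat) : Bool := a.1 < b.1 || (a.1 == b.1 && a.2 < b.2)

def pvBStep (ul : String) (uw : List String)
    (st : Option ((Nat × Nat) × String)) (o : String) : Option ((Nat × Nat) × String) :=
  let k := pvKey ul uw o
  if (2 ≤ k.1 || 0 < k.2) &&
      (match st with | none => true | some (bk, _) => pvKeyLt bk k) then some (k, o) else st

def find_best_option_match_py_alt (user_text : String) (options : List String) : Option String :=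
  let ul := PySem.Str.lower user_text
  let uw := PySem.Str.split₀ ul
  (options.foldl (pvBStep ul uw) none).map (·.2)

-- ===== PRECONDITION & SPEC =====
def Spec_find_best_option_match_py (user_text : String) (options : List String) (out : Option String) : Prop := out = find_best_option_match_py_alt user_text options
instance (user_text : String) (options : List String) (out : Option String) : Decidable (Spec_find_best_option_match_py user_text options out) := by unfold Spec_find_best_option_match_py; infer_instance

-- ===== CLAIM (what is proved, stated in full; the proofs are below) =====
def Claim_equal_find_best_option_match_py : Prop := ∀ (user_text : String) (options : List String), Dom_find_best_option_match_py user_text options → Spec_find_best_option_match_py user_text options (find_best_option_match_py user_text options)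

-- ===== LEMMAS AND PROOFS =====

-- the key of any option is (3,0), (2,0) or (1,m)
theorem pvKey_cases (ul : String) (uw : List String) (o : String) :
    pvKey ul uw o = (3, 0) ∨ pvKey ul uw o = (2, 0) ∨
    ∃ m, pvKey ul uw o = (1, m) := by
  unfold pvKey; dsimp only; split_ifs <;> simp

-- once the accumulator holds an exact match, the fold never changes it
theorem pvB_fold_exact (ul : String) (uw : List String) (o : String) :
    ∀ (rest : List String),
      rest.foldl (pvBStep ul uw) (some ((3, 0), o)) = some ((3, 0), o) := by
  intro rest
  induction rest with
  | nil => rfl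
  | cons x xs ih =>
    have hstep : pvBStep ul uw (some ((3, 0), o)) x = some ((3, 0), o) := by
      unfold pvBStep
      rcases pvKey_cases ul uw x with h | h | ⟨m, h⟩ <;> simp [h, pvKeyLt]
    simp [List.foldl_cons, hstep, ih]

-- with a partial match stored, only a later exact match can replace it
theorem pvB_fold_partial (ul : String) (uw : List String) (o : String) :
    ∀ (rest : List String),
      rest.foldl (pvBStep ul uw) (some ((2, 0), o)) =
        match rest.find? (fun x => ul == PySem.Str.lower x) with
        | some e => some ((3, 0), e)
        | none => some ((2, 0), o) := by
  intro rest
  induction rest with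
  | nil => rfl
  | cons x xs ih =>
    by_cases hx : (ul == PySem.Str.lower x) = true
    · have hk : pvKey ul uw x = (3, 0) := by unfold pvKey; simp [hx]
      have hstep : pvBStep ul uw (some ((2, 0), o)) x = some ((3, 0), x) := by
        unfold pvBStep; simp [hk, pvKeyLt]
      simp [List.foldl_cons, hstep, hx, pvB_fold_exact]
    · have hstep : pvBStep ul uw (some ((2, 0), o)) x = some ((2, 0), o) := by
        unfold pvBStep
        rcases pvKey_cases ul uw x with h | h | ⟨m, h⟩
        · exfalso
          unfold pvKey at h
          dsimp only at h
          simp [hx] at h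
          split_ifs at h <;> simp_all
        · simp [h, pvKeyLt]
        · simp [h, pvKeyLt]
      simp [List.foldl_cons, hstep, hx, ih]

-- relation between B's accumulator and A's word-phase accumulator
def pvRel (st : Option ((Nat × Nat) × String)) (acc : Option String × Nat) : Prop :=
  (st = none ∧ acc = (none, 0)) ∨
  (∃ o, st = some ((1, acc.2), o) ∧ acc.1 = some o ∧ 0 < acc.2)

-- main invariant: B's single fold computes A's three-scan cascade
theorem pvB_fold_main (ul : String) (uw : List String) :
    ∀ (rest : List String) (st : Option ((Nat × Nat) × String)) (acc : Option String × Nat),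
      pvRel st acc →
      (rest.foldl (pvBStep ul uw) st).map (·.2) =
        (match rest.find? (fun o => ul == PySem.Str.lower o) with
        | some o => some o
        | none =>
          match rest.find? (fun o =>
              PySem.Str.isIn ul (PySem.Str.lower o) || PySem.Str.isIn (PySem.Str.lower o) ul) with
          | some o => some o
          | none =>
            let r := rest.foldl (fun (st : Option String × Nat) o =>
              let m := pvMatches uw (PySem.Str.split₀ (PySem.Str.lower o))
              if st.2 < m then (some o, m) else st) acc
            if 0 < r.2 then r.1 else none) := by
  intro rest
  induction rest with
  | nil =>
    intro st acc hrel
    rcases hrel with ⟨h1, h2⟩ | ⟨o, h1, h2, h3⟩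
    · simp [h1, h2]
    · obtain ⟨a1, a2⟩ := acc
      simp at h2
      simp [h1, h2, h3]
  | cons x xs ih =>
    intro st acc hrel
    by_cases hx : (ul == PySem.Str.lower x) = true
    · -- exact match: B jumps to key (3,0) and stays there
      have hk : pvKey ul uw x = (3, 0) := by unfold pvKey; dsimp only; rw [if_pos hx]
      have hstep : pvBStep ul uw st x = some ((3, 0), x) := by
        unfold pvBStep
        rcases hrel with ⟨h1, _⟩ | ⟨o, h1, _, _⟩ <;> simp [h1, hk, pvKeyLt]
      simp [List.foldl_cons, hstep, hx, pvB_fold_exact]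
    · by_cases hp : (PySem.Str.isIn ul (PySem.Str.lower x) || PySem.Str.isIn (PySem.Str.lower x) ul) = true
      · -- partial match: B jumps to key (2,0); only a later exact can replace it
        have hk : pvKey ul uw x = (2, 0) := by unfold pvKey; dsimp only; rw [if_neg hx, if_pos hp]
        have hstep : pvBStep ul uw st x = some ((2, 0), x) := by
          unfold pvBStep
          rcases hrel with ⟨h1, _⟩ | ⟨o, h1, _, _⟩ <;> simp [h1, hk, pvKeyLt]
        rw [List.foldl_cons, hstep, pvB_fold_partial]
        simp only [List.find?_cons, hx, hp]
        cases hfe : List.find? (fun o => ul == PySem.Str.lower o) xs <;> simp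
      · -- word level: both sides keep a (best, count) state related by pvRel
        have hk : pvKey ul uw x = (1, pvMatches uw (PySem.Str.split₀ (PySem.Str.lower x))) := by
          unfold pvKey; dsimp only; rw [if_neg hx, if_neg hp]
        set m := pvMatches uw (PySem.Str.split₀ (PySem.Str.lower x)) with hm
        have hstep : pvBStep ul uw st x =
            if acc.2 < m then some ((1, m), x) else st := by
          unfold pvBStep
          rcases hrel with ⟨h1, h2⟩ | ⟨o, h1, h2, h3⟩
          · rw [h1, h2]
            simp [hk]
          · rw [h1]
            simp only [hk, pvKeyLt]
            by_cases hc : acc.2 < m <;> simp [hc] <;> try omega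
        have hrel' : pvRel (if acc.2 < m then some ((1, m), x) else st)
            (if acc.2 < m then (some x, m) else acc) := by
          by_cases hlt : acc.2 < m
          · exact Or.inr ⟨x, by simp [hlt], by simp [hlt], by simp [hlt]; omega⟩
          · simpa [hlt] using hrel
        have := ih _ _ hrel'
        rw [List.foldl_cons, hstep, this]
        simp only [List.find?_cons, hx, hp]
        rw [List.foldl_cons]

-- ===== VERDICT (by name: the statement is the Claim_ definition above) =====
theorem find_best_option_match_py_spec : Claim_equal_find_best_option_match_py := by
  intro user_text options _
  unfold Spec_find_best_option_match_py find_best_option_match_py find_best_option_match_py_alt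
  exact (pvB_fold_main _ _ options none (none, 0) (Or.inl ⟨rfl, rfl⟩)).symm
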